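-- pv_equiv track=rewrite | github.com/gridvisi/Python_workspace | brilliant/The Cleverer Cat.py | totall
-- ===== SOURCE A (Python) =====
-- def is_prime(a):
--     return a > 1 and all(a % i for i in range(2, a))
--
-- def totall(array,num):
--     total=0
--     for n in range(1,len(array)+1):
--         for i in range(len(array)):
--             cur=array[i:i+n]
--             if len(cur)==n:
--                 prod=1
--                 for i in cur:
--                     prod*=i
--                 if prod<=num and is_prime(prod): total+=1
--     return total
-- ===== SOURCE B (Python) =====
-- def is_prime(a):
--     if a <= 1:
--         return False
--     d = 2
--     while d * d <= a:
--         if a % d == 0: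
--             return False
--         d += 1
--     return True
--
-- def totall(array, num):
--     total = 0
--     L = len(array)
--     for i in range(L):
--         prod = 1
--         for j in range(i, L):
--             prod *= array[j]
--             if prod <= num and is_prime(prod):
--                 total += 1
--     return total
-- ===== Notes on version B (the rewrite author's own statement) =====
-- stated objective: faster
-- what changed: B replaces A's triple loop over window lengths and slices (with trial division up to p-1 for primality) by incremental running products per start index and trial division only up to sqrt(p).
import Mathlib
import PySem

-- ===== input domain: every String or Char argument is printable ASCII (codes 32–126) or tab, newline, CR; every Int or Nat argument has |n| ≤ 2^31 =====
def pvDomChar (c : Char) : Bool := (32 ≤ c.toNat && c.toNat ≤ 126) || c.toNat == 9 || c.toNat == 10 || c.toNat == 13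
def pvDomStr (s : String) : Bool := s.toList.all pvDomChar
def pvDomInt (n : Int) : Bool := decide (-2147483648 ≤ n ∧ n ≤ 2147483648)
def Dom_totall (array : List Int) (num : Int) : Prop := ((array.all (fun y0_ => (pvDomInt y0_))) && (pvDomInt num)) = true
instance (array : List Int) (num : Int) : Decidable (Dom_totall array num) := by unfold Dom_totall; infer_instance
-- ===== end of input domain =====

-- B counts the same prime-product subarrays with incremental running products per
-- start index and trial division only up to sqrt, instead of A's slice-per-length
-- triple loop with trial division up to p-1.

-- ===== PORT A =====
-- is_prime(a): a > 1 and all(a % i for i in range(2, a))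
def pvIsPrimeA (a : Int) : Bool :=
  decide (a > 1) && (PySem.List.pyRange 2 a 1).all (fun i => PySem.Int.mod a i != 0)

def totall (array : List Int) (num : Int) : Int :=
  (PySem.List.pyRange 1 ((array.length : Int) + 1) 1).foldl (fun total n =>
    (PySem.List.pyRange 0 (array.length : Int) 1).foldl (fun total i =>
      let cur := PySem.List.slice array (some i) (some (i + n))
      if ((cur.length : Int) == n) then
        let prod := cur.foldl (fun p x => p * x) 1
        if decide (prod ≤ num) && pvIsPrimeA prod then total + 1 else total
      else total) total) 0

-- ===== PORT B =====
-- while d * d <= a: if a % d == 0: return False; d += 1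
def pvPrimeLoop (a d : Int) : Bool :=
  if h : d * d ≤ a then
    if PySem.Int.mod a d == 0 then false else pvPrimeLoop a (d + 1)
  else true
termination_by (a + 1 - d).toNat
decreasing_by
  have hda : d ≤ a := by nlinarith [sq_nonneg d, sq_nonneg (d - 1)]
  omega

def pvIsPrimeB (a : Int) : Bool :=
  if a ≤ 1 then false else pvPrimeLoop a 2

def totall_alt (array : List Int) (num : Int) : Int :=
  (PySem.List.pyRange 0 (array.length : Int) 1).foldl (fun total i =>
    ((PySem.List.pyRange i (array.length : Int) 1).foldl (fun (st : Int × Int) j =>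
        let prod := st.1 * PySem.List.pyGetD array j 0
        if decide (prod ≤ num) && pvIsPrimeB prod then (prod, st.2 + 1)
        else (prod, st.2)) (1, total)).2) 0

-- ===== PRECONDITION & SPEC =====
def Spec_totall (array : List Int) (num : Int) (out : Int) : Prop := out = totall_alt array num
instance (array : List Int) (num : Int) (out : Int) : Decidable (Spec_totall array num out) := by unfold Spec_totall; infer_instance

-- ===== CLAIM (what is proved, stated in full; the proofs are below) =====
def Claim_equal_totall : Prop := ∀ (array : List Int) (num : Int), Dom_totall array num → Spec_totall array num (totall array num)

-- ===== LEMMAS AND PROOFS =====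

lemma pvPrimeLoop_spec (a d : Int) :
    2 ≤ d → (pvPrimeLoop a d = true ↔ ∀ e : Int, d ≤ e → e * e ≤ a → ¬ e ∣ a) := by
  fun_induction pvPrimeLoop a d with
  | case1 d h hmod =>
      intro hd
      simp only [Bool.false_eq_true, false_iff]
      push Not
      exact ⟨d, le_refl d, h, (PySem.Int.mod_eq_zero_iff_dvd a d).1 (by simpa using hmod)⟩
  | case2 d h hmod ih =>
      intro hd
      rw [ih (by omega)]
      constructor
      · intro hall e hde hee hdvd
        rcases eq_or_lt_of_le hde with rfl | hlt
        · have hne : PySem.Int.mod a d ≠ 0 := by simpa using hmod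
          exact hne ((PySem.Int.mod_eq_zero_iff_dvd a d).2 hdvd)
        · have hde1 : d + 1 ≤ e := by omega
          exact hall e hde1 hee hdvd
      · intro hall e hde hee
        have hde0 : d ≤ e := by omega
        exact hall e hde0 hee
  | case3 d h =>
      intro hd
      simp only [true_iff]
      intro e hde hee hdvd
      have : d * d ≤ e * e := by nlinarith
      omega

lemma pvSqrt_bridge (a : Int) (ha : 2 ≤ a) :
    (∀ e : Int, 2 ≤ e → e * e ≤ a → ¬ e ∣ a) ↔ (∀ i : Int, 2 ≤ i → i < a → ¬ i ∣ a) := by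
  constructor
  · intro h i hi2 hia hdvd
    rcases hdvd with ⟨j, hj⟩
    have hj2 : 2 ≤ j := by nlinarith
    by_cases hii : i * i ≤ a
    · exact h i hi2 hii ⟨j, hj⟩
    · push Not at hii
      have hji : j < i := by nlinarith
      have hjj : j * j ≤ a := by nlinarith
      exact h j hj2 hjj ⟨i, by rw [hj]; ring⟩
  · intro h e he2 hee hdvd
    have : e < a := by nlinarith
    exact h e he2 this hdvd

lemma pvIsPrime_eq (a : Int) : pvIsPrimeA a = pvIsPrimeB a := by
  by_cases ha : a ≤ 1
  · simp [pvIsPrimeA, pvIsPrimeB, ha, show ¬ (1:Int) < a by omega]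
  · have ha2 : 2 ≤ a := by omega
    rw [Bool.eq_iff_iff]
    unfold pvIsPrimeA pvIsPrimeB
    simp only [show (1:Int) < a by omega, decide_true, Bool.true_and,
      if_neg ha, List.all_eq_true]
    constructor
    · intro hall
      rw [pvPrimeLoop_spec a 2 (le_refl 2), pvSqrt_bridge a ha2]
      intro i hi2 hia hdvd
      have := hall i (by rw [PySem.List.mem_pyRange_one]; omega)
      simp only [bne_iff_ne, ne_eq] at this
      exact this ((PySem.Int.mod_eq_zero_iff_dvd a i).2 hdvd)
    · intro hloop i hi
      rw [PySem.List.mem_pyRange_one] at hi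
      rw [pvPrimeLoop_spec a 2 (le_refl 2), pvSqrt_bridge a ha2] at hloop
      simp only [bne_iff_ne, ne_eq]
      intro h0
      exact hloop i hi.1 hi.2 ((PySem.Int.mod_eq_zero_iff_dvd a i).1 h0)

def pvGood (num x : Int) : Bool := decide (x ≤ num) && pvIsPrimeB x

lemma pvSumRange (n : Nat) (f : Nat → Int) :
    ((List.range n).map f).sum = ∑ k ∈ Finset.range n, f k := by
  induction n with
  | zero => simp
  | succ n ih => rw [List.range_succ, Finset.sum_range_succ]; simp [ih]

lemma pvCountP (n : Nat) (p : Nat → Prop) [DecidablePred p] :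
    (((List.range n).countP (fun k => decide (p k)) : Nat) : Int)
      = ∑ k ∈ Finset.range n, (if p k then (1:Int) else 0) := by
  induction n with
  | zero => simp
  | succ n ih =>
    rw [List.range_succ, Finset.sum_range_succ, List.countP_append]
    push_cast
    rw [ih]
    by_cases h : p n <;> simp [h]

lemma pvInnerB (num : Int) (ys : List Int) (p t : Int) :
    (ys.foldl (fun (st : Int × Int) y =>
        if pvGood num (st.1 * y) then (st.1 * y, st.2 + 1) else (st.1 * y, st.2)) (p, t)).2
      = t + ∑ k ∈ Finset.range ys.length,
          (if pvGood num (p * (ys.take (k+1)).prod) then (1:Int) else 0) := by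
  induction ys generalizing p t with
  | nil => simp
  | cons y ys ih =>
    simp only [List.foldl_cons, List.length_cons]
    have hstep : (if pvGood num (p * y) then (p*y, t+1) else (p*y, t))
        = (p*y, t + if pvGood num (p*y) then (1:Int) else 0) := by
      split_ifs <;> simp
    rw [hstep, ih, Finset.sum_range_succ']
    simp only [List.take_succ_cons, List.prod_cons, ← mul_assoc, List.take_zero,
      List.prod_nil, mul_one]
    ring

lemma pvBinner (array : List Int) (num t : Int) (i : Nat) :
    ((PySem.List.pyRange (i:Int) (array.length : Int)).foldl (fun (st : Int × Int) j =>
        let prod := st.1 * PySem.List.pyGetD array j 0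
        if decide (prod ≤ num) && pvIsPrimeB prod then (prod, st.2 + 1) else (prod, st.2)) (1, t)).2
      = t + ∑ k ∈ Finset.range (array.length - i),
          (if pvGood num (((array.drop i).take (k+1)).prod) then (1:Int) else 0) := by
  have h := PySem.List.foldl_pyRange_pyGetD' array 0
    (f := fun (st : Int × Int) y =>
      if pvGood num (st.1 * y) then (st.1 * y, st.2 + 1) else (st.1 * y, st.2))
    (init := ((1:Int), t)) (a := (i:Int)) (Int.natCast_nonneg i)
  have hfun : (fun (st : Int × Int) j =>
      let prod := st.1 * PySem.List.pyGetD array j 0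
      if decide (prod ≤ num) && pvIsPrimeB prod then (prod, st.2 + 1) else (prod, st.2))
    = (fun (st : Int × Int) j =>
      if pvGood num (st.1 * PySem.List.pyGetD array j 0) then
        (st.1 * PySem.List.pyGetD array j 0, st.2 + 1)
      else (st.1 * PySem.List.pyGetD array j 0, st.2)) := rfl
  rw [hfun, h, pvInnerB]
  simp [one_mul]

lemma pvBeq (array : List Int) (num : Int) :
    totall_alt array num = ∑ i ∈ Finset.range array.length,
      ∑ k ∈ Finset.range (array.length - i),
        (if pvGood num (((array.drop i).take (k+1)).prod) then (1:Int) else 0) := by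
  unfold totall_alt
  rw [PySem.List.pyRange_zero_natCast, List.foldl_map]
  have h2 := PySem.List.foldl_congr_mem
    (l := List.range array.length) (init := (0:Int))
    (f := fun (total : Int) (i : Nat) =>
      ((PySem.List.pyRange (i:Int) (array.length : Int)).foldl (fun (st : Int × Int) j =>
        let prod := st.1 * PySem.List.pyGetD array j 0
        if decide (prod ≤ num) && pvIsPrimeB prod then (prod, st.2 + 1) else (prod, st.2)) (1, total)).2)
    (g := fun (total : Int) (i : Nat) =>
      total + ∑ k ∈ Finset.range (array.length - i),
        (if pvGood num (((array.drop i).take (k+1)).prod) then (1:Int) else 0))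
    (fun acc i _ => pvBinner array num acc i)
  rw [h2, PySem.List.foldl_add
    (g := fun (i : Nat) => ∑ k ∈ Finset.range (array.length - i),
      (if pvGood num (((array.drop i).take (k+1)).prod) then (1:Int) else 0)), pvSumRange]
  simp

lemma pvAinner (array : List Int) (num t : Int) (k : Nat) :
    ((PySem.List.pyRange 0 (array.length:Int)).foldl (fun (total : Int) i =>
        let cur := PySem.List.slice array (some i) (some (i + (1 + (k:Int))))
        if ((cur.length : Int) == 1 + (k:Int)) then
          let prod := cur.foldl (fun p x => p * x) 1
          if decide (prod ≤ num) && pvIsPrimeA prod then total + 1 else total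
        else total) t)
      = t + ∑ i ∈ Finset.range array.length,
          (if i + k + 1 ≤ array.length ∧
              pvGood num (((array.drop i).take (k+1)).prod) = true then (1:Int) else 0) := by
  rw [PySem.List.pyRange_zero_natCast, List.foldl_map]
  have hbody : ∀ (total : Int) (i : Nat), i ∈ List.range array.length →
      (let cur := PySem.List.slice array (some (i:Int)) (some ((i:Int) + (1 + (k:Int))))
       if ((cur.length : Int) == 1 + (k:Int)) then
         let prod := cur.foldl (fun p x => p * x) 1
         if decide (prod ≤ num) && pvIsPrimeA prod then total + 1 else total
       else total)
      = (if i + k + 1 ≤ array.length ∧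
            pvGood num (((array.drop i).take (k+1)).prod) = true then total+1 else total) := by
    intro total i _
    have hcast : (i:Int) + (1 + (k:Int)) = (i:Int) + ((k+1 : Nat) : Int) := by push_cast; ring
    simp only [hcast, PySem.List.slice_natCast_add, ← List.prod_eq_foldl, pvIsPrime_eq,
      List.length_take, List.length_drop]
    by_cases hle : i + k + 1 ≤ array.length
    · have hmin : min (k+1) (array.length - i) = k + 1 := by omega
      rw [hmin]
      have hc : (((k+1 : Nat) : Int) == 1 + (k:Int)) = true := by
        simp [beq_iff_eq]; ring
      rw [hc]
      simp only [if_true, pvGood, hle, true_and]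
    · have hc : (((min (k+1) (array.length - i) : Nat) : Int) == 1 + (k:Int)) = false := by
        simp only [beq_eq_false_iff_ne, ne_eq]
        intro hh
        have : min (k+1) (array.length - i) = k + 1 := by exact_mod_cast by push_cast at hh ⊢; omega
        omega
      rw [hc]
      simp [hle]
  have h2 := PySem.List.foldl_congr_mem
    (l := List.range array.length) (init := t)
    (f := fun (total : Int) (i : Nat) =>
      let cur := PySem.List.slice array (some (i:Int)) (some ((i:Int) + (1 + (k:Int))))
      if ((cur.length : Int) == 1 + (k:Int)) then
        let prod := cur.foldl (fun p x => p * x) 1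
        if decide (prod ≤ num) && pvIsPrimeA prod then total + 1 else total
      else total)
    (g := fun (total : Int) (i : Nat) =>
      if i + k + 1 ≤ array.length ∧
          pvGood num (((array.drop i).take (k+1)).prod) = true then total+1 else total)
    hbody
  rw [h2, PySem.List.foldl_ite_add_one (p := fun i : Nat => i + k + 1 ≤ array.length ∧
      pvGood num (((array.drop i).take (k+1)).prod) = true), pvCountP]

lemma pvAeq (array : List Int) (num : Int) :
    totall array num = ∑ k ∈ Finset.range array.length, ∑ i ∈ Finset.range array.length,
      (if i + k + 1 ≤ array.length ∧
          pvGood num (((array.drop i).take (k+1)).prod) = true then (1:Int) else 0) := by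
  unfold totall
  rw [PySem.List.pyRange_one 1 ((array.length:Int) + 1)]
  have hL : ((array.length:Int) + 1 - 1).toNat = array.length := by omega
  rw [hL, List.foldl_map]
  have h2 := PySem.List.foldl_congr_mem
    (l := List.range array.length) (init := (0:Int))
    (f := fun (total : Int) (k : Nat) =>
      (PySem.List.pyRange 0 (array.length:Int)).foldl (fun (total : Int) i =>
        let cur := PySem.List.slice array (some i) (some (i + (1 + (k:Int))))
        if ((cur.length : Int) == 1 + (k:Int)) then
          let prod := cur.foldl (fun p x => p * x) 1
          if decide (prod ≤ num) && pvIsPrimeA prod then total + 1 else total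
        else total) total)
    (g := fun (total : Int) (k : Nat) =>
      total + ∑ i ∈ Finset.range array.length,
        (if i + k + 1 ≤ array.length ∧
            pvGood num (((array.drop i).take (k+1)).prod) = true then (1:Int) else 0))
    (fun acc k _ => pvAinner array num acc k)
  rw [h2, PySem.List.foldl_add
    (g := fun (k : Nat) => ∑ i ∈ Finset.range array.length,
      (if i + k + 1 ≤ array.length ∧
          pvGood num (((array.drop i).take (k+1)).prod) = true then (1:Int) else 0)), pvSumRange]
  simp

lemma pvSwap (L : Nat) (P : Nat → Nat → Prop) [∀ i k, Decidable (P i k)] :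
    (∑ k ∈ Finset.range L, ∑ i ∈ Finset.range L, (if i + k + 1 ≤ L ∧ P i k then (1:Int) else 0))
      = ∑ i ∈ Finset.range L, ∑ k ∈ Finset.range (L - i), (if P i k then (1:Int) else 0) := by
  rw [Finset.sum_comm]
  refine Finset.sum_congr rfl ?_
  intro i hi
  rw [Finset.mem_range] at hi
  calc ∑ k ∈ Finset.range L, (if i + k + 1 ≤ L ∧ P i k then (1:Int) else 0)
      = ∑ k ∈ Finset.range (L - i), (if i + k + 1 ≤ L ∧ P i k then (1:Int) else 0) := by
        refine (Finset.sum_subset (by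
          intro x hx
          rw [Finset.mem_range] at hx ⊢
          omega) ?_).symm
        intro k hkL hk
        rw [Finset.mem_range] at hkL hk
        have hnot : ¬ (i + k + 1 ≤ L) := by omega
        simp [hnot]
    _ = ∑ k ∈ Finset.range (L - i), (if P i k then (1:Int) else 0) := by
        refine Finset.sum_congr rfl ?_
        intro k hk
        rw [Finset.mem_range] at hk
        have hle : i + k + 1 ≤ L := by omega
        simp [hle]

-- ===== VERDICT (by name: the statement is the Claim_ definition above) =====
theorem totall_spec : Claim_equal_totall := by
  intro array num _
  unfold Spec_totall
  rw [pvAeq, pvBeq]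
  exact pvSwap array.length
    (fun i k => pvGood num (((array.drop i).take (k+1)).prod) = true)
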